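-- pv_equiv track=rewrite | github.com/alawein/alawein | scripts/vercel/sync-vercel.py | _reorder_vercel_block
-- ===== SOURCE A (Python) =====
-- from typing import Any, Dict, List, Optional, Tuple
--
-- VERCEL_FIELD_ORDER = (
--     "team_slug",
--     "project_slug",
--     "production_url",
--     "custom_domain",
--     "state",
--     "last_synced_at",
-- )
--
-- def _reorder_vercel_block(block: Dict[str, Any]) -> Dict[str, Any]:
--     """Return a new dict with the vercel sub-keys in the pinned order.
--
--     Unknown keys (none expected, but defensive) are appended after the known
--     ones to surface them via diff rather than dropping them.
--     """
--     ordered: Dict[str, Any] = {}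
--     for key in VERCEL_FIELD_ORDER:
--         if key in block:
--             ordered[key] = block[key]
--     for key, value in block.items():
--         if key not in ordered:
--             ordered[key] = value
--     return ordered
-- ===== SOURCE B (Python) =====
-- VERCEL_FIELD_ORDER = (
--     "team_slug",
--     "project_slug",
--     "production_url",
--     "custom_domain",
--     "state",
--     "last_synced_at",
-- )
--
-- def _reorder_vercel_block(block):
--     """Single stable sort by a pinned-index table instead of two filtered passes."""
--     order = {k: i for i, k in enumerate(VERCEL_FIELD_ORDER)}
--     sentinel = len(VERCEL_FIELD_ORDER)
--     return dict(sorted(block.items(), key=lambda kv: order.get(kv[0], sentinel)))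
-- ===== Notes on version B (the rewrite author's own statement) =====
-- stated objective: idiomatic
-- what changed: Replaces A's two filtered emit-then-append loops by one stable sort of the items under an index table (unknown keys tie at a sentinel index and keep their insertion order).
import Mathlib
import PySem

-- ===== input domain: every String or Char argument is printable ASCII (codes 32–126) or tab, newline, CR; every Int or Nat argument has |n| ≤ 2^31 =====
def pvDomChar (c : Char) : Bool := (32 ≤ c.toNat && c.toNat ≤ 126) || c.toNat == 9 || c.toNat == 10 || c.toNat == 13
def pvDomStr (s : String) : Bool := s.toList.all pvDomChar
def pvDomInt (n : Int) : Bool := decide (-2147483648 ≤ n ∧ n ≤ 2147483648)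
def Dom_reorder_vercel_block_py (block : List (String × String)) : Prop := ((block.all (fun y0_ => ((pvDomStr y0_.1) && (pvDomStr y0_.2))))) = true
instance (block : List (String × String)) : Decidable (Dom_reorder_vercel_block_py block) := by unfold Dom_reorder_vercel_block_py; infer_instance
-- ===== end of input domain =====

-- B replaces A's two filtered emit-then-append passes with one stable sort of the
-- items under a pinned-index table (objective: idiomatic; return value only).

-- VERCEL_FIELD_ORDER (module constant, shared by both programs)
def pvFieldOrder : List String :=
  ["team_slug", "project_slug", "production_url", "custom_domain", "state", "last_synced_at"]

-- ===== PORT A =====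
def reorder_vercel_block_py (block : List (String × String)) : List (String × String) :=
  let d : PySem.Dict String String := PySem.Dict.mk block
  let ordered : PySem.Dict String String :=
    pvFieldOrder.foldl (fun o k =>
      match d.get? k with          -- `if key in block: ordered[key] = block[key]`
      | some v => o.insert k v
      | none => o) PySem.Dict.empty
  let ordered2 : PySem.Dict String String :=
    block.foldl (fun o kv => if o.contains kv.1 then o else o.insert kv.1 kv.2) ordered
  ordered2.items

-- ===== PORT B =====
def reorder_vercel_block_py_alt (block : List (String × String)) : List (String × String) :=
  let order : PySem.Dict String Int :=
    (PySem.List.enumerate pvFieldOrder).foldl (fun d p => d.insert p.2 p.1) PySem.Dict.empty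
  let sentinel : Int := (pvFieldOrder.length : Int)
  (PySem.Dict.ofList
    (PySem.List.sorted block (fun kv => order.getD kv.1 sentinel) false)).items

-- ===== PRECONDITION & SPEC =====
-- Pre_ requires pairwise-distinct keys: the Python argument is a dict, whose association-list
-- image can never carry a duplicate key, so lists with duplicate keys correspond to no Python input.
def Pre_reorder_vercel_block_py (block : List (String × String)) : Prop :=
  (block.map Prod.fst).Nodup
instance (block : List (String × String)) : Decidable (Pre_reorder_vercel_block_py block) := by
  unfold Pre_reorder_vercel_block_py; infer_instance

def pvWitness_reorder_vercel_block_py : (List (String × String)) :=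
  [("state", "ready"), ("team_slug", "t"), ("extra", "x")]

def Spec_reorder_vercel_block_py (block : List (String × String)) (out : List (String × String)) : Prop := out = reorder_vercel_block_py_alt block
instance (block : List (String × String)) (out : List (String × String)) : Decidable (Spec_reorder_vercel_block_py block out) := by unfold Spec_reorder_vercel_block_py; infer_instance

-- ===== CLAIM (what is proved, stated in full; the proofs are below) =====
def Claim_equal_reorder_vercel_block_py : Prop := ∀ (block : List (String × String)), Dom_reorder_vercel_block_py block → Pre_reorder_vercel_block_py block → Spec_reorder_vercel_block_py block (reorder_vercel_block_py block)

-- ===== LEMMAS AND PROOFS =====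

-- the pinned index of a key (6 = sentinel for unknown keys)
def pvKey (k : String) : Int :=
  if k = "team_slug" then 0
  else if k = "project_slug" then 1
  else if k = "production_url" then 2
  else if k = "custom_domain" then 3
  else if k = "state" then 4
  else if k = "last_synced_at" then 5
  else 6

set_option maxRecDepth 10000 in
lemma pvKey_eval (k : String) :
    (PySem.Dict.getD ((PySem.List.enumerate pvFieldOrder).foldl
      (fun d p => d.insert p.2 p.1) PySem.Dict.empty) k ((pvFieldOrder.length : Int))) = pvKey k := by
  have h : ((PySem.List.enumerate pvFieldOrder).foldl (fun d p => d.insert p.2 p.1) PySem.Dict.empty)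
      = PySem.Dict.mk [("team_slug",0),("project_slug",1),("production_url",2),("custom_domain",3),("state",4),("last_synced_at",5)] := by decide
  have hnil : (PySem.Dict.mk ([] : List (String × Int))).get? k = none := rfl
  have hbeq : ∀ a : String, ((a == k) = true) = (k = a) := fun a =>
    propext (by rw [beq_iff_eq]; exact eq_comm)
  rw [h]
  simp only [PySem.Dict.getD_eq_get?_getD, PySem.Dict.get?_mk_cons, hnil, hbeq, pvKey, pvFieldOrder]
  split_ifs <;> rfl

lemma pvKey_mem (k : String) : pvKey k ∈ ([0, 1, 2, 3, 4, 5, 6] : List Int) := by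
  unfold pvKey; split_ifs <;> simp

lemma pvKey_beq0 (kv : String × String) : (pvKey kv.1 == (0:Int)) = (kv.1 == "team_slug") := by
  unfold pvKey; split_ifs <;> simp_all
lemma pvKey_beq1 (kv : String × String) : (pvKey kv.1 == (1:Int)) = (kv.1 == "project_slug") := by
  unfold pvKey; split_ifs <;> simp_all
lemma pvKey_beq2 (kv : String × String) : (pvKey kv.1 == (2:Int)) = (kv.1 == "production_url") := by
  unfold pvKey; split_ifs <;> simp_all
lemma pvKey_beq3 (kv : String × String) : (pvKey kv.1 == (3:Int)) = (kv.1 == "custom_domain") := by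
  unfold pvKey; split_ifs <;> simp_all
lemma pvKey_beq4 (kv : String × String) : (pvKey kv.1 == (4:Int)) = (kv.1 == "state") := by
  unfold pvKey; split_ifs <;> simp_all
lemma pvKey_beq5 (kv : String × String) : (pvKey kv.1 == (5:Int)) = (kv.1 == "last_synced_at") := by
  unfold pvKey; split_ifs <;> simp_all
lemma pvKey_eq_six (k : String) : (pvKey k == (6:Int)) = !(decide (k ∈ pvFieldOrder)) := by
  unfold pvKey; split_ifs <;> simp_all [pvFieldOrder]

lemma insertBy_append_not_before {α : Type} (before : α → α → Bool) (x : α) (l1 l2 : List α)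
    (h : ∀ y ∈ l1, before x y = false) :
    PySem.List.insertBy before x (l1 ++ l2) = l1 ++ PySem.List.insertBy before x l2 := by
  induction l1 with
  | nil => simp
  | cons a l ih =>
      simp only [List.cons_append, PySem.List.insertBy, h a (by simp)]
      simpa using ih (fun y hy => h y (by simp [hy]))

lemma insertBy_front {α : Type} (before : α → α → Bool) (x : α) (l : List α)
    (h : ∀ y ∈ l, before x y = true) :
    PySem.List.insertBy before x l = x :: l := by
  cases l with
  | nil => rfl
  | cons a l => simp [PySem.List.insertBy, h a (by simp)]

-- a stable sort with Int keys drawn from a strictly increasing value list is the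
-- concatenation of the key-level filters
lemma sorted_filter_concat {α : Type} (key : α → Int) (vals : List Int)
    (hv : vals.Pairwise (· < ·)) :
    ∀ xs : List α, (∀ x ∈ xs, key x ∈ vals) →
      PySem.List.sorted xs key false = vals.flatMap (fun v => xs.filter (fun x => key x == v)) := by
  intro xs
  induction xs using List.reverseRecOn with
  | nil => simp [PySem.List.sorted_eq_foldl_insertBy]
  | append_singleton bs x ih =>
      intro hmem
      have hbs := ih (fun y hy => hmem y (by simp [hy]))
      rw [PySem.List.sorted_eq_foldl_insertBy] at hbs ⊢
      rw [List.foldl_append, List.foldl_cons, List.foldl_nil, hbs]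
      obtain ⟨v1, v2, hsplit⟩ := List.append_of_mem (hmem x (by simp))
      subst hsplit
      have hlt1 : ∀ a ∈ v1, a < key x := by
        intro a ha
        exact (List.pairwise_append.1 hv).2.2 a ha (key x) (by simp)
      have hlt2 : ∀ b ∈ v2, key x < b := by
        have := (List.pairwise_append.1 hv).2.1
        exact fun b hb => (List.pairwise_cons.1 this).1 b hb
      have hflat : (v1 ++ key x :: v2).flatMap (fun v => bs.filter (fun y => key y == v))
          = ((v1 ++ [key x]).flatMap (fun v => bs.filter (fun y => key y == v)))
            ++ v2.flatMap (fun v => bs.filter (fun y => key y == v)) := by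
        simp [List.flatMap_append]
      rw [hflat]
      rw [insertBy_append_not_before _ _ _ _ (by
        intro y hy
        simp only [List.mem_flatMap, List.mem_filter] at hy
        obtain ⟨v, hvmem, hy, hkey⟩ := hy
        have : key y = v := by simpa using hkey
        have hle : key y ≤ key x := by
          rcases List.mem_append.1 hvmem with h1 | h1
          · exact le_of_lt (this ▸ hlt1 v h1)
          · simp at h1; omega
        simp [not_lt.2 hle])]
      rw [insertBy_front _ _ _ (by
        intro y hy
        simp only [List.mem_flatMap, List.mem_filter] at hy
        obtain ⟨v, hvmem, hy, hkey⟩ := hy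
        have : key y = v := by simpa using hkey
        have := hlt2 v hvmem
        simp; omega)]
      simp only [List.flatMap_append, List.flatMap_cons, List.flatMap_nil, List.filter_append]
      have hfx : ∀ v : Int, List.filter (fun y => key y == v) [x] = if key x = v then [x] else [] := by
        intro v
        by_cases h : key x = v
        · simp [List.filter, h]
        · have hb : (key x == v) = false := by simpa using h
          simp [List.filter, hb, h]
      have h1 : v1.flatMap (fun v => (bs.filter (fun y => key y == v)) ++ (List.filter (fun y => key y == v) [x]))
          = v1.flatMap (fun v => bs.filter (fun y => key y == v)) := by
        apply List.flatMap_congr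
        intro v hvm
        rw [hfx v, if_neg (by have := hlt1 v hvm; omega)]
        simp
      have h2 : v2.flatMap (fun v => (bs.filter (fun y => key y == v)) ++ (List.filter (fun y => key y == v) [x]))
          = v2.flatMap (fun v => bs.filter (fun y => key y == v)) := by
        apply List.flatMap_congr
        intro v hvm
        rw [hfx v, if_neg (by have := hlt2 v hvm; omega)]
        simp
      rw [h1, h2, hfx (key x), if_pos rfl]
      simp

lemma ofList_items_of_nodup (l : List (String × String)) (h : (l.map Prod.fst).Nodup) :
    (PySem.Dict.ofList l).items = l := by
  have := PySem.Dict.items_foldl_insert_fresh l Prod.fst Prod.snd PySem.Dict.empty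
    (by intro a _; simp) (by simpa using h)
  simpa [PySem.Dict.ofList, PySem.Dict.update] using this

lemma filter_eq_find_toList (bl : List (String × String)) (k : String)
    (h : (bl.map Prod.fst).Nodup) :
    bl.filter (fun kv => kv.1 == k) = (bl.find? (fun kv => kv.1 == k)).toList := by
  induction bl with
  | nil => simp
  | cons p bl ih =>
      simp only [List.map_cons, List.nodup_cons] at h
      by_cases hp : p.1 = k
      · have hb : (p.1 == k) = true := by simpa using hp
        have hnone : bl.filter (fun kv => kv.1 == k) = [] := by
          rw [List.filter_eq_nil_iff]
          intro kv hkv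
          have : kv.1 ∈ bl.map Prod.fst := List.mem_map_of_mem hkv
          have : kv.1 ≠ p.1 := fun he => h.1 (he ▸ this)
          simp [hp ▸ this]
        simp [List.filter, List.find?, hb, hnone]
      · have hb : (p.1 == k) = false := by simpa using hp
        simp [List.filter, List.find?, hb, ih h.2]

lemma seg_eq (block : List (String × String)) (k : String)
    (hnd : (block.map Prod.fst).Nodup) :
    (((PySem.Dict.mk block).get? k).map (fun v => (k, v))).toList
      = block.filter (fun kv => kv.1 == k) := by
  rw [filter_eq_find_toList block k hnd]
  have hg : (PySem.Dict.mk block).get? k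
      = Option.map (fun p => p.2) (block.find? (fun kv => kv.1 == k)) := rfl
  rw [hg]
  cases hf : block.find? (fun kv => kv.1 == k) with
  | none => simp
  | some p =>
      have hp : p.1 = k := by simpa using List.find?_some hf
      simp [← hp]

lemma first_loop_items (K : List String) (d : PySem.Dict String String) :
    ∀ o : PySem.Dict String String, K.Nodup → (∀ k ∈ K, o.contains k = false) →
      (K.foldl (fun o k =>
        match d.get? k with
        | some v => o.insert k v
        | none => o) o).items
        = o.items ++ K.flatMap (fun k => ((d.get? k).map (fun v => (k, v))).toList) := by
  induction K with
  | nil => intro o _ _; simp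
  | cons k K ih =>
      intro o hnd hfresh
      simp only [List.nodup_cons] at hnd
      rw [List.foldl_cons]
      cases hd : d.get? k with
      | none =>
          rw [ih o hnd.2 (fun k' hk' => hfresh k' (by simp [hk']))]
          simp [hd]
      | some v =>
          have hfo : o.contains k = false := hfresh k (by simp)
          have hins : (o.insert k v).items = o.items ++ [(k, v)] :=
            PySem.Dict.items_insert_of_not_contains o v hfo
          rw [ih (o.insert k v) hnd.2 (fun k' hk' => by
            have hne : k' ≠ k := fun he => hnd.1 (he ▸ hk')
            rw [PySem.Dict.contains_insert]
            simp [hne, hfresh k' (by simp [hk'])])]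
          simp [hins, hd]

lemma second_loop_items (bl : List (String × String)) :
    ∀ o : PySem.Dict String String, (bl.map Prod.fst).Nodup →
      (bl.foldl (fun o kv => if o.contains kv.1 then o else o.insert kv.1 kv.2) o).items
        = o.items ++ bl.filter (fun kv => !(o.contains kv.1)) := by
  induction bl with
  | nil => intro o _; simp
  | cons kv bl ih =>
      intro o hnd
      simp only [List.map_cons, List.nodup_cons] at hnd
      rw [List.foldl_cons]
      by_cases hc : o.contains kv.1
      · rw [if_pos hc, ih o hnd.2]
        simp [List.filter, hc]
      · have hcf : o.contains kv.1 = false := by simpa using hc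
        rw [if_neg hc, ih (o.insert kv.1 kv.2) hnd.2]
        have hins : (o.insert kv.1 kv.2).items = o.items ++ [(kv.1, kv.2)] :=
          PySem.Dict.items_insert_of_not_contains o kv.2 hcf
        have hfc : bl.filter (fun p => !((o.insert kv.1 kv.2).contains p.1))
            = bl.filter (fun p => !(o.contains p.1)) := by
          apply List.filter_congr
          intro p hp
          have : p.1 ∈ bl.map Prod.fst := List.mem_map_of_mem hp
          have hne : p.1 ≠ kv.1 := fun he => hnd.1 (he ▸ this)
          rw [PySem.Dict.contains_insert]
          simp [hne]
        rw [hfc, hins]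
        simp [List.filter, hcf]

-- ===== VERDICT (by name: the statement is the Claim_ definition above) =====
theorem reorder_vercel_block_py_spec : Claim_equal_reorder_vercel_block_py := by
  intro block _ hnd
  unfold Pre_reorder_vercel_block_py at hnd
  unfold Spec_reorder_vercel_block_py
  unfold reorder_vercel_block_py reorder_vercel_block_py_alt
  simp only []
  -- B side
  have hkey : (fun kv : String × String =>
      PySem.Dict.getD ((PySem.List.enumerate pvFieldOrder).foldl
        (fun d p => d.insert p.2 p.1) PySem.Dict.empty) kv.1 ((pvFieldOrder.length : Int)))
      = (fun kv : String × String => pvKey kv.1) := funext (fun kv => pvKey_eval kv.1)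
  rw [hkey]
  have hsorted : PySem.List.sorted block (fun kv : String × String => pvKey kv.1) false
      = ([0,1,2,3,4,5,6] : List Int).flatMap
          (fun v => block.filter (fun kv => pvKey kv.1 == v)) :=
    sorted_filter_concat _ _ (by decide) block (fun kv _ => pvKey_mem kv.1)
  have hnodup : ((PySem.List.sorted block (fun kv : String × String => pvKey kv.1) false).map
      Prod.fst).Nodup :=
    (((PySem.List.sorted_perm block (fun kv : String × String => pvKey kv.1) false).map
      Prod.fst).nodup_iff).2 hnd
  rw [ofList_items_of_nodup _ hnodup, hsorted]
  -- A side
  have hA1 := first_loop_items pvFieldOrder (PySem.Dict.mk block) PySem.Dict.empty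
    (by decide) (by intro k _; simp)
  have hA1' : pvFieldOrder.flatMap
      (fun k => (((PySem.Dict.mk block).get? k).map (fun v => (k, v))).toList)
      = pvFieldOrder.flatMap (fun k => block.filter (fun kv => kv.1 == k)) :=
    List.flatMap_congr (fun k _ => seg_eq block k hnd)
  set o1 := pvFieldOrder.foldl (fun o k =>
      match (PySem.Dict.mk block).get? k with
      | some v => o.insert k v
      | none => o) PySem.Dict.empty with ho1
  have ho1items : o1.items = pvFieldOrder.flatMap (fun k => block.filter (fun kv => kv.1 == k)) := by
    rw [hA1, hA1']; rfl
  rw [second_loop_items block o1 hnd, ho1items]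
  -- characterise membership in o1
  have hcontains : ∀ kv ∈ block, o1.contains kv.1 = decide (kv.1 ∈ pvFieldOrder) := by
    intro kv hkv
    have hc : o1.contains kv.1
        = (pvFieldOrder.flatMap (fun k => block.filter (fun p => p.1 == k))).any
            (fun p => p.1 == kv.1) := by
      have h0 : o1.contains kv.1 = o1.items.any (fun p => p.1 == kv.1) := rfl
      rw [h0, ho1items]
    rw [hc]
    by_cases hm : kv.1 ∈ pvFieldOrder
    · simp only [hm, decide_true]
      rw [List.any_eq_true]
      exact ⟨kv, List.mem_flatMap.2 ⟨kv.1, hm, List.mem_filter.2 ⟨hkv, by simp⟩⟩, by simp⟩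
    · simp only [hm, decide_false]
      rw [List.any_eq_false]
      intro p hp
      obtain ⟨k, hkm, hpf⟩ := List.mem_flatMap.1 hp
      have hpk : p.1 = k := by simpa using (List.mem_filter.1 hpf).2
      rw [hpk]
      intro he
      have hke : k = kv.1 := by simpa using he
      subst hke
      exact hm hkm
  have hunk : block.filter (fun kv => !(o1.contains kv.1))
      = block.filter (fun kv => pvKey kv.1 == (6:Int)) := by
    apply List.filter_congr
    intro kv hkv
    rw [hcontains kv hkv, pvKey_eq_six]
  rw [hunk]
  -- both sides are now explicit concatenations of the seven filters
  have e0 := funext (pvKey_beq0)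
  have e1 := funext (pvKey_beq1)
  have e2 := funext (pvKey_beq2)
  have e3 := funext (pvKey_beq3)
  have e4 := funext (pvKey_beq4)
  have e5 := funext (pvKey_beq5)
  simp only [pvFieldOrder, List.flatMap_cons, List.flatMap_nil, List.append_nil,
    e0, e1, e2, e3, e4, e5, List.append_assoc]
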